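-- pv_equiv track=rewrite | github.com/Chaooz/adventofcode | 2023/Day 13/Thor/solution.py | smudge_in_mirror
-- ===== SOURCE A (Python) =====
-- def isPowerOfTwo( x ):
--
--     # First x in the below expression is
--     # for the case when x is 0
--     return x and (not(x & (x - 1)))
--
-- def differAtOneBitPos( a , b ):
--     return isPowerOfTwo(a ^ b)
--
-- def smudge_in_mirror(mirror_list:list, line:int) -> bool:
--     smudgeLine = 0
--     for j in range(1, len(mirror_list)):
--         indexA = line - j - 1
--         indexB = line + j
--         if indexA < 0 or indexB >= len(mirror_list):
--             return smudgeLine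
--
--         aa = mirror_list[indexA]
--         bb = mirror_list[indexB]
--
--         if differAtOneBitPos(aa,bb) and smudgeLine == 0:
--             smudgeLine = j
--         elif differAtOneBitPos(aa,bb):
--             return 0
--     return smudgeLine
-- ===== SOURCE B (Python) =====
-- def smudge_in_mirror(mirror_list: list, line: int) -> bool:
--     n = len(mirror_list)
--     if line < 2 or line > n - 1:
--         return 0
--     top = mirror_list[:line - 1][::-1]      # rows above the seam beyond the immediate pair, nearest first
--     bottom = mirror_list[line + 1:]         # rows below it, nearest first
--     flags = [d != 0 and d & (d - 1) == 0
--              for d in (a ^ b for a, b in zip(top, bottom))]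
--     return flags.index(True) + 1 if flags.count(True) == 1 else 0
-- ===== Notes on version B (the rewrite author's own statement) =====
-- stated objective: alternative
-- what changed: Replaces A's index-arithmetic loop (per-step bounds checks, running smudgeLine, two early returns) by data reshaping: slice the rows above the seam reversed and below it, zip them, map each pair to a single-bit-difference flag, and decide with list.count/list.index (exactly one flag -> its 1-based position, else 0) -- no hand-written loop, no early exit, no index arithmetic in the scan.
import Mathlib
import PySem

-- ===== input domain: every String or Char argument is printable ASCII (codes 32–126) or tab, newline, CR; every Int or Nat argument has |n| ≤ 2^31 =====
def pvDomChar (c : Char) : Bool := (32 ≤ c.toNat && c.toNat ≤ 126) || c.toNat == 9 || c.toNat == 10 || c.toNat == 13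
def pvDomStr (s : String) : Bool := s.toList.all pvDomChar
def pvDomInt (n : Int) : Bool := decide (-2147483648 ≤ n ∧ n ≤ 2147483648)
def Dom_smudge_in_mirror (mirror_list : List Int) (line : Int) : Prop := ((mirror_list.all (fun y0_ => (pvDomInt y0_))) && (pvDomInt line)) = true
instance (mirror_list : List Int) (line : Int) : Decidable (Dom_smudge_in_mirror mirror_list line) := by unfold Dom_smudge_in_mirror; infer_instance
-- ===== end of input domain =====

-- B replaces A's index-arithmetic loop (bounds checks, running smudgeLine, early returns) by
-- slicing and zipping the two halves around the seam, mapping pairs to single-bit flags, and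
-- deciding with count/index (objective: alternative).

-- ===== PORT A =====
def isPowerOfTwo (x : Int) : Bool := (x != 0) && (PySem.Int.band x (x - 1) == 0)

def differAtOneBitPos (a b : Int) : Bool := isPowerOfTwo (PySem.Int.bxor a b)

-- the for-loop of A: js is the remaining range values, s the running smudgeLine
def smudgeLoopA (mirror_list : List Int) (line : Int) : List Int → Int → Int
  | [], s => s
  | j :: rest, s =>
    let indexA := line - j - 1
    let indexB := line + j
    if indexA < 0 ∨ indexB ≥ (mirror_list.length : Int) then s
    else
      let aa := (PySem.List.pyGet? mirror_list indexA).getD 0  -- in range here: indexA ≥ 0 and indexA < indexB < len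
      let bb := (PySem.List.pyGet? mirror_list indexB).getD 0
      if differAtOneBitPos aa bb && (s == 0) then smudgeLoopA mirror_list line rest j
      else if differAtOneBitPos aa bb then 0
      else smudgeLoopA mirror_list line rest s

def smudge_in_mirror (mirror_list : List Int) (line : Int) : Int :=
  smudgeLoopA mirror_list line (PySem.List.pyRange 1 (mirror_list.length : Int) 1) 0

-- ===== PORT B =====
def smudge_in_mirror_alt (mirror_list : List Int) (line : Int) : Int :=
  let n : Int := (mirror_list.length : Int)
  if line < 2 ∨ line > n - 1 then 0
  else
    -- mirror_list[:line-1][::-1]  ([::-1] is reverse, PySem.List.slice?_none_none_neg_one)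
    let top := (PySem.List.slice mirror_list none (some (line - 1))).reverse
    -- mirror_list[line+1:]
    let bottom := PySem.List.slice mirror_list (some (line + 1)) none
    let flags := ((top.zip bottom).map (fun p => PySem.Int.bxor p.1 p.2)).map
        (fun d => (d != 0) && (PySem.Int.band d (d - 1) == 0))
    if flags.count true == 1
    then (((PySem.List.index? flags true).getD 0 : Nat) : Int) + 1  -- flags.index(True): guarded by count == 1
    else 0

-- ===== PRECONDITION & SPEC =====
def Spec_smudge_in_mirror (mirror_list : List Int) (line : Int) (out : Int) : Prop := out = smudge_in_mirror_alt mirror_list line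
instance (mirror_list : List Int) (line : Int) (out : Int) : Decidable (Spec_smudge_in_mirror mirror_list line out) := by unfold Spec_smudge_in_mirror; infer_instance

-- ===== CLAIM (what is proved, stated in full; the proofs are below) =====
def Claim_equal_smudge_in_mirror : Prop := ∀ (mirror_list : List Int) (line : Int), Dom_smudge_in_mirror mirror_list line → Spec_smudge_in_mirror mirror_list line (smudge_in_mirror mirror_list line)

-- ===== LEMMAS AND PROOFS =====

-- check-free state machine (A's loop restricted to in-range offsets)
def pureLoop (d : Int → Bool) : List Int → Int → Int
  | [], s => s
  | j :: rest, s =>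
    if d j && (s == 0) then pureLoop d rest j
    else if d j then 0
    else pureLoop d rest s

theorem pureLoop_ne (d : Int → Bool) (js : List Int) (s : Int) (hs : s ≠ 0) :
    pureLoop d js s = if js.any d then 0 else s := by
  induction js with
  | nil => simp [pureLoop]
  | cons j rest ih =>
    simp only [pureLoop, List.any_cons]
    by_cases hj : d j = true <;> simp [hj, hs, ih]

theorem pureLoop_zero (d : Int → Bool) (js : List Int) (hjs : ∀ j ∈ js, j ≠ 0) :
    pureLoop d js 0 =
      if (js.filter d).length == 1 then (PySem.List.pyGet? (js.filter d) 0).getD 0 else 0 := by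
  induction js with
  | nil => simp [pureLoop]
  | cons j rest ih =>
    have hj0 : j ≠ 0 := hjs j (by simp)
    by_cases hj : d j = true
    · simp only [pureLoop, hj, Bool.true_and, List.filter_cons_of_pos hj]
      rw [if_pos (by simp), pureLoop_ne d rest j hj0]
      by_cases h : rest.filter d = []
      · have hany : rest.any d = false := by
          rw [List.any_eq_false]
          exact fun x hx => List.filter_eq_nil_iff.mp h x hx
        simp [h, hany]
      · rcases List.exists_cons_of_ne_nil h with ⟨y, ys, hys⟩
        have hy : y ∈ rest.filter d := by simp [hys]
        obtain ⟨hym, hyd⟩ := List.mem_filter.mp hy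
        have hany : rest.any d = true := List.any_eq_true.mpr ⟨y, hym, hyd⟩
        simp [hany, hys]
    · have ih' := ih (fun x hx => hjs x (List.mem_cons_of_mem _ hx))
      have hfn : List.filter d (j :: rest) = List.filter d rest :=
        List.filter_cons_of_neg (by simp [hj])
      simp [pureLoop, hj, hfn, ih']

-- A's loop over a prefix of in-range offsets followed by a failing offset equals pureLoop on the prefix
theorem smudgeLoopA_split (ml : List Int) (line : Int) (xs : List Int) (y : Int) (rest : List Int) (s : Int)
    (hy : line - y - 1 < 0 ∨ line + y ≥ (ml.length : Int))
    (hxs : ∀ j ∈ xs, ¬(line - j - 1 < 0 ∨ line + j ≥ (ml.length : Int))) :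
    smudgeLoopA ml line (xs ++ y :: rest) s =
      pureLoop (fun j => differAtOneBitPos ((PySem.List.pyGet? ml (line - j - 1)).getD 0)
                                           ((PySem.List.pyGet? ml (line + j)).getD 0)) xs s := by
  induction xs generalizing s with
  | nil =>
    simp only [List.nil_append, smudgeLoopA, pureLoop]
    rw [if_pos hy]
  | cons j tl ih =>
    have hj := hxs j (List.mem_cons_self ..)
    simp only [List.cons_append, smudgeLoopA, pureLoop, if_neg hj]
    have ihtl := fun s => ih s (fun x hx => hxs x (List.mem_cons_of_mem _ hx))
    split_ifs <;> simp [ihtl]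

-- A equals the filter characterisation over the reflection half-width
theorem A_char (ml : List Int) (line : Int) :
    smudge_in_mirror ml line =
      (if ((PySem.List.pyRange 1 (min line ((ml.length : Int) - line)) 1).filter
            (fun j => differAtOneBitPos ((PySem.List.pyGet? ml (line - j - 1)).getD 0)
                                        ((PySem.List.pyGet? ml (line + j)).getD 0))).length == 1
       then (PySem.List.pyGet? ((PySem.List.pyRange 1 (min line ((ml.length : Int) - line)) 1).filter
            (fun j => differAtOneBitPos ((PySem.List.pyGet? ml (line - j - 1)).getD 0)
                                        ((PySem.List.pyGet? ml (line + j)).getD 0))) 0).getD 0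
       else 0) := by
  unfold smudge_in_mirror
  set L : Int := (ml.length : Int) with hL
  have hL0 : 0 ≤ L := by positivity
  set bound := min line (L - line) with hbound
  set d : Int → Bool := fun j => differAtOneBitPos ((PySem.List.pyGet? ml (line - j - 1)).getD 0)
                                                   ((PySem.List.pyGet? ml (line + j)).getD 0) with hd
  have hmin1 : bound ≤ line := by rw [hbound]; exact min_le_left _ _
  have hmin2 : bound ≤ L - line := by rw [hbound]; exact min_le_right _ _
  by_cases hLz : L ≤ 1
  · have hb0 : bound ≤ 1 := by omega
    have h1 : PySem.List.pyRange 1 L 1 = [] := PySem.List.pyRange_one_eq_nil (by omega)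
    have h2 : PySem.List.pyRange 1 bound 1 = [] := PySem.List.pyRange_one_eq_nil (by omega)
    simp [h1, h2, smudgeLoopA]
  · have hL1 : 2 ≤ L := by omega
    set c : Int := max bound 1 with hc
    have hmax1 : bound ≤ c := by rw [hc]; exact le_max_left _ _
    have hc1 : 1 ≤ c := by rw [hc]; exact le_max_right _ _
    have hmax : c = bound ∨ c = 1 := by rw [hc]; exact max_choice _ _
    have hcL : c < L := by omega
    have hsplit : PySem.List.pyRange 1 L 1 =
        PySem.List.pyRange 1 c 1 ++ PySem.List.pyRange c L 1 :=
      PySem.List.pyRange_one_append 1 c L hc1 (by omega)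
    have htail : PySem.List.pyRange c L 1 = c :: PySem.List.pyRange (c+1) L 1 :=
      PySem.List.pyRange_one_cons hcL
    have hpass : ∀ j ∈ PySem.List.pyRange 1 c 1, ¬(line - j - 1 < 0 ∨ line + j ≥ L) := by
      intro j hj
      have := (PySem.List.mem_pyRange_one).mp hj
      omega
    have hfail : line - c - 1 < 0 ∨ line + c ≥ L := by omega
    have hA : smudgeLoopA ml line (PySem.List.pyRange 1 L 1) 0 =
        pureLoop d (PySem.List.pyRange 1 c 1) 0 := by
      rw [hsplit, htail]
      exact smudgeLoopA_split ml line _ c _ 0 hfail hpass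
    have hrange : PySem.List.pyRange 1 c 1 = PySem.List.pyRange 1 bound 1 := by
      by_cases hb1 : 1 ≤ bound
      · have : c = bound := by omega
        rw [this]
      · have h1 : PySem.List.pyRange 1 c 1 = [] := PySem.List.pyRange_one_eq_nil (by omega)
        have h2 : PySem.List.pyRange 1 bound 1 = [] := PySem.List.pyRange_one_eq_nil (by omega)
        rw [h1, h2]
    rw [hA, hrange, pureLoop_zero]
    intro j hj
    have := (PySem.List.mem_pyRange_one).mp hj
    omega

-- first-match bridge: head of the filtered list = element at the index of the first true flag
theorem head?_filter_index? {α : Type} (l : List α) (g : α → Bool) :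
    (l.filter g).head? = (PySem.List.index? (l.map g) true).bind (fun k => l[k]?) := by
  induction l with
  | nil => simp [PySem.List.index?]
  | cons a l ih =>
    by_cases hg : g a = true
    · rw [List.filter_cons_of_pos hg, List.map_cons, hg, PySem.List.index?_cons_self]
      simp
    · rw [List.filter_cons_of_neg (by simp [hg]), List.map_cons]
      rw [PySem.List.index?_cons_of_ne (List.map g l) (by simp [hg])]
      cases h : PySem.List.index? (l.map g) true with
      | none => rw [ih, h]; simp
      | some k => rw [ih, h]; simp

-- count of true flags = length of the filtered list
theorem count_true_map (l : List Nat) (g : Nat → Bool) :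
    List.count true (l.map g) = (l.filter g).length := by
  simp [List.count_eq_countP, List.countP_eq_length_filter, List.filter_map, Function.comp_def]

theorem smudge_in_mirror_eq_alt (ml : List Int) (line : Int) :
    smudge_in_mirror ml line = smudge_in_mirror_alt ml line := by
  rw [A_char]
  unfold smudge_in_mirror_alt
  simp only []
  set L : Int := (ml.length : Int) with hL
  set d : Int → Bool := fun j => differAtOneBitPos ((PySem.List.pyGet? ml (line - j - 1)).getD 0)
                                                   ((PySem.List.pyGet? ml (line + j)).getD 0) with hd
  by_cases hguard : line < 2 ∨ line > L - 1
  · -- small seam: the offset range is empty, A's characterisation also gives 0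
    rw [if_pos hguard]
    have hb : min line (L - line) ≤ 1 := by
      rcases hguard with h | h
      · exact le_trans (min_le_left _ _) (by omega)
      · exact le_trans (min_le_right _ _) (by omega)
    have hnil : PySem.List.pyRange 1 (min line (L - line)) 1 = [] :=
      PySem.List.pyRange_one_eq_nil (by omega)
    simp [hnil]
  · rw [if_neg hguard]
    rw [not_or, not_lt, not_lt] at hguard
    obtain ⟨h2, hln⟩ := hguard
    have hlen1 : 1 ≤ ml.length := by omega
    set t : Nat := line.toNat with ht
    have hline : line = (t : Int) := by omega
    have ht2 : 2 ≤ t := by omega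
    have htn : t ≤ ml.length - 1 := by omega
    have htn' : (t : Int) ≤ (ml.length : Int) - 1 := by omega
    have htop : PySem.List.slice ml none (some (line - 1)) = ml.take (t - 1) := by
      rw [PySem.List.slice_to ml (by omega : (0:Int) ≤ line - 1)]
      congr 1
      omega
    have hbot : PySem.List.slice ml (some (line + 1)) none = ml.drop (t + 1) := by
      rw [PySem.List.slice_from ml (by omega : (0:Int) ≤ line + 1)]
      congr 1
      omega
    rw [htop, hbot]
    set m : Nat := min (t - 1) (ml.length - (t + 1)) with hm
    have hzip : ((ml.take (t - 1)).reverse.zip (ml.drop (t + 1))) =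
        (List.range m).map (fun i => (ml.getD (t - 2 - i) 0, ml.getD (t + 1 + i) 0)) := by
      apply List.ext_getElem
      · simp [hm]
      · intro i h1 h2
        have him : i < m := by
          simp at h1
          omega
        have hi2 : t + 1 + i < ml.length := by omega
        have hidx : t - 2 - i < ml.length := by omega
        simp only [List.getElem_zip, List.getElem_map, List.getElem_range]
        rw [Prod.mk.injEq]
        refine ⟨?_, ?_⟩
        · rw [List.getElem_reverse, List.getElem_take, List.getD_eq_getElem ml 0 hidx]
          congr 1
          simp
          omega
        · rw [List.getElem_drop, List.getD_eq_getElem ml 0 hi2]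

    rw [hzip, List.map_map, List.map_map]
    set g : Nat → Bool := fun i => d (1 + (i : Int)) with hg
    have hflags : (List.range m).map (((fun dd => (dd != 0) && (PySem.Int.band dd (dd - 1) == 0)) ∘
        (fun p : Int × Int => PySem.Int.bxor p.1 p.2)) ∘
        (fun i => (ml.getD (t - 2 - i) 0, ml.getD (t + 1 + i) 0))) = (List.range m).map g := by
      apply List.map_congr_left
      intro i hi
      have him : i < m := List.mem_range.mp hi
      have e1 : (PySem.List.pyGet? ml (line - (1 + (i : Int)) - 1)).getD 0 = ml.getD (t - 2 - i) 0 := by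
        have h : line - (1 + (i : Int)) - 1 = ((t - 2 - i : Nat) : Int) := by omega
        rw [h, PySem.List.pyGet?_natCast, List.getD_eq_getElem?_getD]
      have e2 : (PySem.List.pyGet? ml (line + (1 + (i : Int)))).getD 0 = ml.getD (t + 1 + i) 0 := by
        have h : line + (1 + (i : Int)) = ((t + 1 + i : Nat) : Int) := by omega
        rw [h, PySem.List.pyGet?_natCast, List.getD_eq_getElem?_getD]
      simp only [Function.comp, hg, hd, differAtOneBitPos, isPowerOfTwo, e1, e2]
    rw [hflags]
    have hbt : (min line (L - line) - 1).toNat = m := by omega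
    rw [PySem.List.pyRange_one, hbt, List.filter_map]
    have hcomp : (List.range m).filter (d ∘ fun k : Nat => 1 + (k : Int)) = (List.range m).filter g := by
      simp [Function.comp_def, hg]
    rw [hcomp, count_true_map]
    set F := (List.range m).filter g with hF
    by_cases hone : F.length = 1
    · obtain ⟨j, hj⟩ := List.length_eq_one_iff.mp hone
      have hhead := head?_filter_index? (List.range m) g
      rw [← hF, hj] at hhead
      simp only [List.head?_cons] at hhead
      cases hidx : PySem.List.index? ((List.range m).map g) true with
      | none => rw [hidx] at hhead; simp at hhead
      | some k =>
        rw [hidx] at hhead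
        simp only [Option.bind_some] at hhead
        have hkj : k = j := by
          by_cases hkm : k < m
          · rw [List.getElem?_range hkm] at hhead
            exact (Option.some_injective _ hhead).symm
          · rw [List.getElem?_eq_none (by simpa using hkm)] at hhead
            exact absurd hhead (by simp)
        subst hkj
        rw [hj]
        simp [PySem.List.pyGet?, PySem.List.pyIdx?]
        omega
    · rw [if_neg (by simpa using hone), if_neg (by simpa using hone)]

-- ===== VERDICT (by name: the statement is the Claim_ definition above) =====
theorem smudge_in_mirror_spec : Claim_equal_smudge_in_mirror := by
  intro ml line _
  unfold Spec_smudge_in_mirror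
  exact smudge_in_mirror_eq_alt ml line
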